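-- pv_equiv track=rewrite | github.com/adombrowski/text_generator | gen_train.py | genIntSeq
-- ===== SOURCE A (Python) =====
-- def genIntSeq(elements, el_2_int, seq_length):
-- 	dataX = []
-- 	dataY = []
-- 	for n in range(0, len(elements) - seq_length, 1):
-- 		seq_in = elements[n:n+seq_length]
-- 		seq_out = elements[n + seq_length]
-- 		dataX.append([el_2_int[e] for e in seq_in])
-- 		dataY.append(el_2_int[seq_out])
-- 	return dataX, dataY
-- ===== SOURCE B (Python) =====
-- def genIntSeq(elements, el_2_int, seq_length):
--     if len(elements) <= seq_length:
--         return [], []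
--     ints = [el_2_int[e] for e in elements]
--     shifts = [ints[i:] for i in range(seq_length + 1)]
--     rows = list(zip(*shifts))
--     dataX = [list(r[:-1]) for r in rows]
--     dataY = [r[-1] for r in rows]
--     return dataX, dataY
-- ===== Notes on version B (the rewrite author's own statement) =====
-- stated objective: alternative
-- what changed: B maps elements to ints once, builds seq_length+1 shifted copies of that table and transposes them with zip(*...): each transposed row is one window plus its target, so there is no index loop and no per-window slicing/lookup as in A.
-- outside the precondition, e.g. on genIntSeq(['a', 'b'], {'a': 1, 'b': 2}, -1): A returns ([[1], [], []], [2, 1, 2]), B returns ([], [])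
import Mathlib
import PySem

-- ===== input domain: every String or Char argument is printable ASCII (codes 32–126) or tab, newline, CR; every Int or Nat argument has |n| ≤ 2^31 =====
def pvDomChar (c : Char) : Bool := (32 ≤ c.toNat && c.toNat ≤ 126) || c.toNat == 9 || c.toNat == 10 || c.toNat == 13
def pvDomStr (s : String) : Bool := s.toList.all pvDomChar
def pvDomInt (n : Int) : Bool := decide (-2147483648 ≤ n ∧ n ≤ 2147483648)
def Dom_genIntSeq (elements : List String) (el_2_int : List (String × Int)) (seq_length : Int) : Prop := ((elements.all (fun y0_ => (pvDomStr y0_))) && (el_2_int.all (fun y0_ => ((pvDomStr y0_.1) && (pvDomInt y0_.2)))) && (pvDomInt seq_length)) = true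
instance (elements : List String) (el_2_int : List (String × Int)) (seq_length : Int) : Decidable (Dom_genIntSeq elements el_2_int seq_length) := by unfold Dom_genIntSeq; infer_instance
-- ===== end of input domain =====

-- B replaces A's indexed loop of per-window dict-lookup comprehensions by one mapping pass
-- into an int table followed by a transpose (zip) of its shifted copies (objective: alternative).

-- ===== PORT A =====
-- literal port of A: for n in range(0, len(elements)-seq_length, 1), window comprehension
-- [el_2_int[e] for e in seq_in] and target el_2_int[elements[n+seq_length]].
-- Raising subscripts (IndexError/KeyError) are modelled by Option with .getD defaults;
-- Pre_genIntSeq excludes exactly the inputs on which they would fire, so the port is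
-- exact on Pre_.
def genIntSeq (elements : List String) (el_2_int : List (String × Int)) (seq_length : Int) : List (List Int) × List Int :=
  let d := PySem.Dict.ofList el_2_int
  (PySem.List.pyRange 0 ((elements.length : Int) - seq_length) 1).foldl
    (fun (acc : List (List Int) × List Int) n =>
      let seq_in := PySem.List.slice elements (some n) (some (n + seq_length))
      let seq_out? := PySem.List.pyGet? elements (n + seq_length)
      (acc.1 ++ [seq_in.map (fun e => (d.get? e).getD 0)],
       acc.2 ++ [(seq_out?.bind (fun e => d.get? e)).getD 0]))
    ([], [])

-- ===== PORT B =====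
-- hand port of Python's zip(*cols) for a list of int lists: rows of heads until some
-- column is exhausted; exact (zip of zero iterables is empty, zip truncates to shortest).
def pyZipStar (cols : List (List Int)) : List (List Int) :=
  if h : cols = [] ∨ cols.any List.isEmpty then []
  else (cols.map (fun c => c.headD 0)) :: pyZipStar (cols.map List.tail)
termination_by (cols.headD []).length
decreasing_by
  rw [not_or] at h
  obtain ⟨h1, h2⟩ := h
  cases cols with
  | nil => exact absurd rfl h1
  | cons c cs =>
      have hc : c ≠ [] := by
        intro hc; rw [hc] at h2; simp at h2
      simp only [List.headD_cons]
      have : c.length - 1 < c.length := Nat.sub_lt (List.length_pos_of_ne_nil hc) one_pos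
      simpa [List.length_tail]

-- literal port of Source B: guard, the int table, the shifted copies, zip(*shifts),
-- then rows split into r[:-1] and r[-1].
def genIntSeq_alt (elements : List String) (el_2_int : List (String × Int)) (seq_length : Int) : List (List Int) × List Int :=
  if (elements.length : Int) ≤ seq_length then ([], [])
  else
    let d := PySem.Dict.ofList el_2_int
    let ints := elements.map (fun e => (d.get? e).getD 0)
    let shifts := (PySem.List.pyRange 0 (seq_length + 1) 1).map
      (fun i => PySem.List.slice ints (some i) none)
    let rows := pyZipStar shifts
    (rows.map (fun r => PySem.List.slice r none (some (-1))),
     rows.map (fun r => (PySem.List.pyGet? r (-1)).getD 0))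

-- ===== PRECONDITION & SPEC =====
-- Pre_ keeps the natural domain: seq_length ≥ 0 (a negative window length is outside the
-- task's natural domain; there A returns accidental wraparound windows/targets which B,
-- built from range(seq_length+1) shifts, does not reproduce — see the cite), and, whenever
-- the loop runs, every element must be a key of el_2_int (else Python A raises KeyError).
def Pre_genIntSeq (elements : List String) (el_2_int : List (String × Int)) (seq_length : Int) : Prop :=
  0 ≤ seq_length ∧
  (seq_length < (elements.length : Int) →
    ∀ e ∈ elements, ((PySem.Dict.ofList el_2_int).get? e).isSome)
instance (elements : List String) (el_2_int : List (String × Int)) (seq_length : Int) : Decidable (Pre_genIntSeq elements el_2_int seq_length) := by unfold Pre_genIntSeq; infer_instance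
def pvWitness_genIntSeq : List String × (List (String × Int)) × Int :=
  (["a", "b", "c"], [("a", 1), ("b", 2), ("c", 3)], 2)
def Spec_genIntSeq (elements : List String) (el_2_int : List (String × Int)) (seq_length : Int) (out : List (List Int) × List Int) : Prop := out = genIntSeq_alt elements el_2_int seq_length
instance (elements : List String) (el_2_int : List (String × Int)) (seq_length : Int) (out : List (List Int) × List Int) : Decidable (Spec_genIntSeq elements el_2_int seq_length out) := by unfold Spec_genIntSeq; infer_instance

-- ===== CLAIM (what is proved, stated in full; the proofs are below) =====
def Claim_equal_genIntSeq : Prop := ∀ (elements : List String) (el_2_int : List (String × Int)) (seq_length : Int), Dom_genIntSeq elements el_2_int seq_length → Pre_genIntSeq elements el_2_int seq_length → Spec_genIntSeq elements el_2_int seq_length (genIntSeq elements el_2_int seq_length)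

-- ===== LEMMAS AND PROOFS =====

-- closed form of the transpose of the k+1 shifted copies of ys: its rows are the
-- length-(k+1) windows of ys.
theorem pyZipStar_shifts (k : Nat) (ys : List Int) :
    pyZipStar ((List.range (k + 1)).map (fun i => ys.drop i)) =
      (List.range (ys.length - k)).map (fun n => (ys.drop n).take (k + 1)) := by
  induction ys with
  | nil =>
      rw [pyZipStar]
      simp
  | cons y t ih =>
      by_cases hlen : t.length < k
      · rw [pyZipStar]
        have hany : ((List.range (k + 1)).map (fun i => (y :: t).drop i)).any List.isEmpty = true := by
          rw [List.any_map, List.any_eq_true]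
          refine ⟨k, by simp, ?_⟩
          simp [Function.comp, List.isEmpty_iff, List.drop_eq_nil_iff]
          omega
        rw [dif_pos (Or.inr hany)]
        have hz : (y :: t).length - k = 0 := by simp; omega
        rw [hz]
        simp
      · rw [pyZipStar]
        have hne : ¬(((List.range (k + 1)).map (fun i => (y :: t).drop i)) = [] ∨
            ((List.range (k + 1)).map (fun i => (y :: t).drop i)).any List.isEmpty) := by
          rintro (hcon | hcon)
          · simp at hcon
          · rw [List.any_map, List.any_eq_true] at hcon
            obtain ⟨i, hi, hemp⟩ := hcon
            simp only [List.mem_range] at hi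
            simp only [Function.comp_apply, List.isEmpty_iff, List.drop_eq_nil_iff] at hemp
            simp at hemp
            omega
        rw [dif_neg hne]
        have htails : ((List.range (k + 1)).map (fun i => (y :: t).drop i)).map List.tail =
            (List.range (k + 1)).map (fun i => t.drop i) := by
          rw [List.map_map]
          refine List.map_congr_left ?_
          intro i hi
          simp only [Function.comp_apply]
          rw [List.tail_drop]
          rfl
        have hheads : ((List.range (k + 1)).map (fun i => (y :: t).drop i)).map (fun c => c.headD 0) =
            (y :: t).take (k + 1) := by
          rw [List.map_map]
          apply List.ext_getElem
          · simp; omega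
          · intro i h1 h2
            simp only [List.getElem_map, List.getElem_range, Function.comp_apply,
              List.getElem_take]
            simp only [List.length_map, List.length_range] at h1
            rw [List.headD_eq_head?_getD, List.head?_drop,
              List.getElem?_eq_getElem (by simp; omega)]
            rfl
        rw [htails, hheads, ih]
        have hlt : (y :: t).length - k = (t.length - k) + 1 := by simp; omega
        rw [hlt, List.range_succ_eq_map]
        simp only [List.map_cons, List.map_map]
        congr 1

-- A's loop with two append accumulators is a pair of maps over the range.
theorem foldl_pair_append (l : List Int) (f : Int → List Int) (g : Int → Int)
    (aX : List (List Int)) (aY : List Int) :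
    l.foldl (fun (acc : List (List Int) × List Int) n => (acc.1 ++ [f n], acc.2 ++ [g n]))
      (aX, aY) = (aX ++ l.map f, aY ++ l.map g) := by
  induction l generalizing aX aY with
  | nil => simp
  | cons x xs ih => simp [ih]

-- r[-1] with default on a nonempty list is the last element.
theorem pyGet_neg_one_getD (r : List Int) (h : r ≠ []) :
    (PySem.List.pyGet? r (-1)).getD 0 = r.getD (r.length - 1) 0 := by
  have hr : 0 < r.length := List.length_pos_of_ne_nil h
  have h1 : ¬ (0 : Int) ≤ -1 := by omega
  have h2 : -(r.length : Int) ≤ -1 := by omega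
  simp only [PySem.List.pyGet?, PySem.List.pyIdx?, h1, if_false, h2, if_true]
  have h3 : r.length - (-(-1 : Int)).toNat = r.length - 1 := by norm_num
  rw [h3, List.getD_eq_getElem?_getD]
  rfl

-- ===== VERDICT (by name: the statement is the Claim_ definition above) =====
theorem genIntSeq_spec : Claim_equal_genIntSeq := by
  intro elements el_2_int seq_length _ hpre
  obtain ⟨hk, hkeys⟩ := hpre
  obtain ⟨k, rfl⟩ := Int.eq_ofNat_of_zero_le hk
  unfold Spec_genIntSeq genIntSeq genIntSeq_alt
  by_cases hle : (elements.length : Int) ≤ (k : Int)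
  · rw [if_pos hle]
    have : PySem.List.pyRange 0 ((elements.length : Int) - (k : Int)) 1 = [] := by
      rw [PySem.List.pyRange_one]
      have h0 : ((elements.length : Int) - (k : Int) - 0).toNat = 0 := by omega
      rw [h0]; simp
    rw [this]
    rfl
  · rw [if_neg hle]
    push_neg at hle
    dsimp only
    set d := PySem.Dict.ofList el_2_int with hd
    set ints := elements.map (fun e => (d.get? e).getD 0) with hints
    have hilen : ints.length = elements.length := by simp [hints]
    -- B's shifts are the drops of ints
    have hshifts : (PySem.List.pyRange 0 ((k : Int) + 1) 1).map
        (fun i => PySem.List.slice ints (some i) none) =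
        (List.range (k + 1)).map (fun i => ints.drop i) := by
      rw [PySem.List.pyRange_one]
      have : ((k : Int) + 1 - 0).toNat = k + 1 := by omega
      rw [this, List.map_map]
      refine List.map_congr_left ?_
      intro i _
      simp only [Function.comp_apply, zero_add]
      exact PySem.List.slice_from_natCast ints i
    rw [hshifts, pyZipStar_shifts]
    -- A's range as a Nat range
    have hrange : PySem.List.pyRange 0 ((elements.length : Int) - (k : Int)) 1 =
        (List.range (elements.length - k)).map Int.ofNat := by
      rw [PySem.List.pyRange_one]
      have hT : ((elements.length : Int) - (k : Int) - 0).toNat = elements.length - k := by omega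
      rw [hT]
      refine List.map_congr_left ?_
      intro n _
      simp
    rw [hrange, foldl_pair_append]
    rw [hilen]
    simp only [List.nil_append, List.map_map, Prod.mk.injEq]
    constructor
    · -- dataX
      refine List.map_congr_left ?_
      intro n hn
      simp only [List.mem_range] at hn
      simp only [Function.comp_apply, Int.ofNat_eq_natCast]
      -- window of row n
      have hcast : (n : Int) + (k : Int) = ((n + k : Nat) : Int) := by push_cast; ring
      have hsub : n + k - n = k := by omega
      have hlen1 : ((ints.drop n).take (k + 1)).length = k + 1 := by
        simp [hilen]; omega
      -- B side: dropLast of the (k+1)-window is the k-window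
      rw [hcast, PySem.List.slice_natCast, hsub, PySem.List.slice_to_neg_one,
        List.dropLast_eq_take, hlen1]
      simp only [Nat.add_sub_cancel]
      rw [List.take_take]
      have hmin : min k (k + 1) = k := by omega
      rw [hmin]
      simp [hints, List.map_take, List.map_drop]
    · -- dataY
      refine List.map_congr_left ?_
      intro n hn
      simp only [List.mem_range] at hn
      simp only [Function.comp_apply, Int.ofNat_eq_natCast]
      have hcast : (n : Int) + (k : Int) = ((n + k : Nat) : Int) := by push_cast; ring
      have hidx : n + k < elements.length := by omega
      rw [hcast, PySem.List.pyGet?_natCast, List.getElem?_eq_getElem hidx]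
      have hrne : (ints.drop n).take (k + 1) ≠ [] := by
        intro hcon
        have := congrArg List.length hcon
        simp [hilen] at this
        omega
      rw [pyGet_neg_one_getD _ hrne]
      have hlen1 : ((ints.drop n).take (k + 1)).length = k + 1 := by
        simp [hilen]; omega
      rw [hlen1]
      simp only [Nat.add_sub_cancel]
      have hRv : ((ints.drop n).take (k + 1)).getD k 0 = ints.getD (n + k) 0 := by
        simp [List.getD_eq_getElem?_getD, List.getElem?_take, List.getElem?_drop,
          Nat.lt_succ_self]
      rw [hRv, List.getD_eq_getElem?_getD,
        List.getElem?_eq_getElem (by rw [hilen]; omega : n + k < ints.length)]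
      simp [hints]
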